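-- pv_equiv track=rewrite | github.com/seqan/seqan | util/py_lib/seqan/dddoc/html.py | _splitIncludeFile
-- ===== SOURCE A (Python) =====
-- def _splitIncludeFile(txt):
--     """Splits text from included file.
--
--     Returns a list of pairs.  Each pair contains the type of the entry in
--     the first and the text of the entry in the second component.  The type
--     is either 'TEXT' or 'COD'E.
--     """
--     result = []
--     curr_type = None
--     curr_chunk = []
--     for line in txt.splitlines():
--         if line.startswith('///'):
--             if curr_type != 'TEXT':
--                 if curr_chunk:
--                     result.append((curr_type, curr_chunk))
--                 curr_type = 'TEXT'
--                 curr_chunk = [line[3:]]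
--             else:
--                 curr_chunk.append(line[3:])
--         else:
--             if curr_type != 'CODE':
--                 if curr_chunk:
--                     result.append((curr_type, curr_chunk))
--                 curr_type = 'CODE'
--                 curr_chunk = [line]
--             else:
--                 curr_chunk.append(line)
--     if curr_chunk:  # Last open chunk.
--         result.append((curr_type, curr_chunk))
--     return result
-- ===== SOURCE B (Python) =====
-- def _splitIncludeFile(txt):
--     """Split included file text into ('TEXT', lines)/('CODE', lines) chunks.
--
--     Staged approach: first tag every line with whether it is a '///' doc
--     line, then compute the list of boundary indices where the tag changes,
--     and finally slice the line list between consecutive boundaries.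
--     """
--     lines = txt.splitlines()
--     if not lines:
--         return []
--     keys = [l.startswith('///') for l in lines]
--     n = len(lines)
--     bounds = [0] + [i for i in range(1, n) if keys[i] != keys[i - 1]] + [n]
--     result = []
--     for a, b in zip(bounds, bounds[1:]):
--         chunk = lines[a:b]
--         if keys[a]:
--             result.append(('TEXT', [l[3:] for l in chunk]))
--         else:
--             result.append(('CODE', chunk))
--     return result
-- ===== Notes on version B (the rewrite author's own statement) =====
-- stated objective: alternative
-- what changed: Instead of A's single-pass curr_type/curr_chunk state machine with flush logic, B works in stages: it tags each line with a boolean key, computes the list of indices where the key changes, and then slices the line list between consecutive boundary indices to build the chunks.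
import Mathlib
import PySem

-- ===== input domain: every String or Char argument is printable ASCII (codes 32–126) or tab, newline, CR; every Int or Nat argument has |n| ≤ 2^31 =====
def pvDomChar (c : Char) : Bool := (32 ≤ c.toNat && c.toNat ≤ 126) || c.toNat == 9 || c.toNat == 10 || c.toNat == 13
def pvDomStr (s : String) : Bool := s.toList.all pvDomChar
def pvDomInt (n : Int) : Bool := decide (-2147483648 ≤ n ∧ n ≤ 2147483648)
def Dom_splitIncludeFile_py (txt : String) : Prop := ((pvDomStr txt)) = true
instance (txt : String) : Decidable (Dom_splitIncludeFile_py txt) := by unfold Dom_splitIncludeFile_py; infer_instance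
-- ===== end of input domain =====

-- B replaces A's single-pass curr_type/curr_chunk state machine by a staged computation:
-- tag lines, list the indices where the tag changes, then slice between consecutive boundaries (alternative decomposition, same cost).


-- ===== PORT A =====
-- Loop body of A; state = (result, curr_type, curr_chunk).  In Python curr_type is None
-- only while curr_chunk is empty, so the '.getD ""' placeholder used when flushing is never read.
def pvStepA (st : List (String × List String) × Option String × List String) (line : String) :
    List (String × List String) × Option String × List String :=
  let (result, currType, currChunk) := st
  if PySem.Str.startswith line "///" then
    if currType ≠ some "TEXT" then
      ((if currChunk ≠ [] then result ++ [(currType.getD "", currChunk)] else result),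
       some "TEXT", [PySem.Str.slice line (some 3) none])
    else
      (result, currType, currChunk ++ [PySem.Str.slice line (some 3) none])
  else
    if currType ≠ some "CODE" then
      ((if currChunk ≠ [] then result ++ [(currType.getD "", currChunk)] else result),
       some "CODE", [line])
    else
      (result, currType, currChunk ++ [line])

def splitIncludeFile_py (txt : String) : List (String × List String) :=
  let fin := (PySem.Str.splitlines txt).foldl pvStepA ([], none, [])
  if fin.2.2 ≠ [] then fin.1 ++ [(fin.2.1.getD "", fin.2.2)] else fin.1

-- ===== PORT B =====
-- Staged: keys = [l.startswith('///')], bounds = [0] + change points + [n], then slice.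
def splitIncludeFile_py_alt (txt : String) : List (String × List String) :=
  let lines := PySem.Str.splitlines txt
  if lines = [] then []
  else
    let keys := lines.map (fun l => PySem.Str.startswith l "///")
    let n : Int := PySem.List.len lines
    let bounds : List Int :=
      [0] ++ (PySem.List.pyRange 1 n 1).filter
        (fun i => PySem.List.pyGetD keys i false != PySem.List.pyGetD keys (i - 1) false) ++ [n]
    (bounds.zip bounds.tail).map (fun ab =>
      let chunk := PySem.List.slice lines (some ab.1) (some ab.2)
      if PySem.List.pyGetD keys ab.1 false then
        ("TEXT", chunk.map (fun l => PySem.Str.slice l (some 3) none))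
      else
        ("CODE", chunk))

-- ===== PRECONDITION & SPEC =====
def Spec_splitIncludeFile_py (txt : String) (out : List (String × List String)) : Prop := out = splitIncludeFile_py_alt txt
instance (txt : String) (out : List (String × List String)) : Decidable (Spec_splitIncludeFile_py txt out) := by unfold Spec_splitIncludeFile_py; infer_instance

-- ===== CLAIM (what is proved, stated in full; the proofs are below) =====
def Claim_equal_splitIncludeFile_py : Prop := ∀ (txt : String), Dom_splitIncludeFile_py txt → Spec_splitIncludeFile_py txt (splitIncludeFile_py txt)

-- ===== LEMMAS AND PROOFS =====

def pvKey (l : String) : Bool := PySem.Str.startswith l "///"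
def pvTypeName (k : Bool) : String := if k then "TEXT" else "CODE"
def pvVal (k : Bool) (l : String) : String := if k then PySem.Str.slice l (some 3) none else l
def pvFlush (st : List (String × List String) × Option String × List String) : List (String × List String) :=
  if st.2.2 ≠ [] then st.1 ++ [(st.2.1.getD "", st.2.2)] else st.1
def pvOut (r : Bool × List String) : String × List String :=
  if r.1 then ("TEXT", r.2.map (fun l => PySem.Str.slice l (some 3) none)) else ("CODE", r.2)

-- the list of maximal runs of lines with equal key (the common reference point of both proofs)
def pvRuns (lines : List String) : List (Bool × List String) :=
  match lines with
  | [] => []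
  | l :: ls =>
    let k := PySem.Str.startswith l "///"
    (k, l :: ls.takeWhile (fun x => PySem.Str.startswith x "///" == k)) ::
      pvRuns (ls.dropWhile (fun x => PySem.Str.startswith x "///" == k))
termination_by lines.length
decreasing_by
  simp only [List.length_cons]
  exact Nat.lt_succ_of_le (List.length_dropWhile_le _ _)

-- ---- A-side: the state machine produces the runs ----

lemma pvStepA_eq (res : List (String × List String)) (ct : Option String) (chunk : List String) (line : String) :
    pvStepA (res, ct, chunk) line =
      if ct = some (pvTypeName (pvKey line)) then (res, ct, chunk ++ [pvVal (pvKey line) line])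
      else ((if chunk ≠ [] then res ++ [(ct.getD "", chunk)] else res),
            some (pvTypeName (pvKey line)), [pvVal (pvKey line) line]) := by
  unfold pvStepA pvKey pvTypeName pvVal
  cases PySem.Str.startswith line "///" <;> simp

lemma pvTypeName_inj {a b : Bool} (h : pvTypeName a = pvTypeName b) : a = b := by
  cases a <;> cases b <;> simp_all [pvTypeName]

lemma pvVal_false : pvVal false = fun l => l := rfl

lemma pvOut_run (k : Bool) (g : List String) : pvOut (k, g) = (pvTypeName k, g.map (pvVal k)) := by
  cases k <;> simp [pvOut, pvTypeName, pvVal, pvVal_false, List.map_id']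

-- consume a run whose every line has key k, from a same-typed state
lemma pvFold_run (g : List String) (k : Bool) :
    ∀ (res : List (String × List String)) (chunk : List String), (∀ x ∈ g, pvKey x = k) →
    List.foldl pvStepA (res, some (pvTypeName k), chunk) g
      = (res, some (pvTypeName k), chunk ++ g.map (pvVal k)) := by
  induction g with
  | nil => simp
  | cons l ls ih =>
    intro res chunk h
    have hl : pvKey l = k := h l (by simp)
    rw [List.foldl_cons, pvStepA_eq, hl, if_pos rfl,
        ih res (chunk ++ [pvVal k l]) (fun x hx => h x (by simp [hx]))]
    simp

def pvConsume (k : Bool) (chunk : List String) (rs : List (Bool × List String)) :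
    List (String × List String) :=
  match rs with
  | [] => [(pvTypeName k, chunk)]
  | (k', g) :: rest =>
    if k' = k then (pvTypeName k, chunk ++ g.map (pvVal k)) :: rest.map pvOut
    else (pvTypeName k, chunk) :: ((k', g) :: rest).map pvOut

lemma pvConsume_nomerge (k : Bool) (chunk : List String) (rs : List (Bool × List String))
    (h : ∀ k' g, rs.head? = some (k', g) → k' ≠ k) :
    pvConsume k chunk rs = (pvTypeName k, chunk) :: rs.map pvOut := by
  cases rs with
  | nil => simp [pvConsume]
  | cons r rest =>
    obtain ⟨k', g⟩ := r
    simp [pvConsume, h k' g (by simp)]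

lemma pvRuns_head_key (lines : List String) (k' : Bool) (g : List String)
    (h : (pvRuns lines).head? = some (k', g)) : ∃ l ls, lines = l :: ls ∧ k' = pvKey l := by
  cases lines with
  | nil => simp [pvRuns] at h
  | cons l ls =>
    rw [pvRuns] at h
    simp at h
    exact ⟨l, ls, rfl, h.1.symm⟩

lemma pvDropWhile_head_not {p : String → Bool} {ls : List String} {r : String} {rs : List String}
    (h : ls.dropWhile p = r :: rs) : p r = false := by
  have := List.head?_dropWhile_not p ls
  rw [h] at this
  simpa using this

lemma pvMain (n : Nat) : ∀ (lines : List String), lines.length ≤ n →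
    ∀ (res : List (String × List String)) (k : Bool) (chunk : List String), chunk ≠ [] →
    pvFlush (List.foldl pvStepA (res, some (pvTypeName k), chunk) lines)
      = res ++ pvConsume k chunk (pvRuns lines) := by
  induction n with
  | zero =>
    intro lines hn res k chunk hc
    have : lines = [] := List.eq_nil_of_length_eq_zero (Nat.le_zero.mp hn)
    subst this
    simp [pvFlush, pvConsume, pvRuns, hc]
  | succ n ih =>
    intro lines hn res k chunk hc
    cases lines with
    | nil => simp [pvFlush, pvConsume, pvRuns, hc]
    | cons l ls =>
      set k' := pvKey l with hk'
      set g := ls.takeWhile (fun x => PySem.Str.startswith x "///" == k') with hg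
      set rest := ls.dropWhile (fun x => PySem.Str.startswith x "///" == k') with hrest
      have hsplit : ls = g ++ rest := (List.takeWhile_append_dropWhile).symm
      have hgkeys : ∀ x ∈ g, pvKey x = k' := by
        intro x hx
        have := List.mem_takeWhile_imp (hg ▸ hx)
        simpa [pvKey] using this
      have hrestlen : rest.length ≤ n := by
        have h1 : rest.length ≤ ls.length := by
          rw [hrest]
          exact List.length_dropWhile_le _ _
        simp only [List.length_cons] at hn
        omega
      have hrestkey : ∀ a b, (pvRuns rest).head? = some (a, b) → a ≠ k' := by
        intro a b hab
        obtain ⟨r, rs, hr, hkey⟩ := pvRuns_head_key rest a b hab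
        have h2 := pvDropWhile_head_not (hrest.symm.trans hr)
        subst hkey
        show pvKey r ≠ k'
        intro hh
        rw [show pvKey r = PySem.Str.startswith r "///" from rfl] at hh
        rw [hh] at h2
        simp at h2
      have hruns : pvRuns (l :: ls) = (k', l :: g) :: pvRuns rest := by
        rw [pvRuns]
        simp only [hk', hg, hrest, pvKey]
      rw [hruns]
      by_cases hkk : k' = k
      · subst hkk
        rw [List.foldl_cons, pvStepA_eq, ← hk', if_pos rfl, hsplit, List.foldl_append,
            pvFold_run g k' _ _ hgkeys,
            ih rest hrestlen res k' (chunk ++ [pvVal k' l] ++ g.map (pvVal k')) (by simp),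
            pvConsume_nomerge k' _ _ hrestkey]
        simp [pvConsume]
      · have hne : ¬ (some (pvTypeName k) = some (pvTypeName (pvKey l))) := by
          intro h
          exact hkk ((hk' ▸ pvTypeName_inj (Option.some.inj h)).symm)
        rw [List.foldl_cons, pvStepA_eq, if_neg hne, if_pos hc, ← hk', hsplit, List.foldl_append,
            pvFold_run g k' _ _ hgkeys,
            ih rest hrestlen _ k' ([pvVal k' l] ++ g.map (pvVal k')) (by simp),
            pvConsume_nomerge k' _ _ hrestkey]
        simp [pvConsume, hkk, pvOut_run, Option.getD]

-- A's value is the run list rendered by pvOut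
lemma pvA_runs (txt : String) :
    splitIncludeFile_py txt = (pvRuns (PySem.Str.splitlines txt)).map pvOut := by
  unfold splitIncludeFile_py
  cases hl : PySem.Str.splitlines txt with
  | nil => simp [pvRuns]
  | cons l ls =>
    set k' := pvKey l with hk'
    set g := ls.takeWhile (fun x => PySem.Str.startswith x "///" == k') with hg
    set rest := ls.dropWhile (fun x => PySem.Str.startswith x "///" == k') with hrest
    have hsplit : ls = g ++ rest := (List.takeWhile_append_dropWhile).symm
    have hgkeys : ∀ x ∈ g, pvKey x = k' := by
      intro x hx
      have := List.mem_takeWhile_imp (hg ▸ hx)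
      simpa [pvKey] using this
    have hrestkey : ∀ a b, (pvRuns rest).head? = some (a, b) → a ≠ k' := by
      intro a b hab
      obtain ⟨r, rs, hr, hkey⟩ := pvRuns_head_key rest a b hab
      have h2 := pvDropWhile_head_not (hrest.symm.trans hr)
      subst hkey
      show pvKey r ≠ k'
      intro hh
      rw [show pvKey r = PySem.Str.startswith r "///" from rfl] at hh
      rw [hh] at h2
      simp at h2
    have hruns : pvRuns (l :: ls) = (k', l :: g) :: pvRuns rest := by
      rw [pvRuns]
      simp only [hk', hg, hrest, pvKey]
    have hfirst : pvStepA ([], none, []) l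
        = ([], some (pvTypeName k'), [pvVal k' l]) := by
      rw [pvStepA_eq, ← hk']
      simp
    show pvFlush (List.foldl pvStepA ([], none, []) (l :: ls)) = _
    rw [hruns, List.foldl_cons, hfirst, hsplit, List.foldl_append, pvFold_run g k' _ _ hgkeys,
        pvMain rest.length rest le_rfl [] k' ([pvVal k' l] ++ g.map (pvVal k')) (by simp),
        pvConsume_nomerge k' _ _ hrestkey]
    simp [pvOut_run]

-- ---- B-side: boundary indices and slices produce the runs ----

-- Nat-level mirror of B's computation (bridged to the port by pvAlt_chunks)
def pvBnds (keys : List Bool) : List Nat :=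
  (List.range' 1 (keys.length - 1)).filter
    (fun i => keys.getD i false != keys.getD (i - 1) false)

def pvChunk (lines : List String) (keys : List Bool) (ab : Nat × Nat) : String × List String :=
  let chunk := (lines.drop ab.1).take (ab.2 - ab.1)
  if keys.getD ab.1 false then
    ("TEXT", chunk.map (fun l => PySem.Str.slice l (some 3) none))
  else
    ("CODE", chunk)

def pvChunks (lines : List String) : List (String × List String) :=
  if lines = [] then []
  else
    let keys := lines.map pvKey
    let bounds := 0 :: pvBnds keys ++ [lines.length]
    (bounds.zip bounds.tail).map (pvChunk lines keys)

lemma pvAlt_chunks (txt : String) :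
    splitIncludeFile_py_alt txt = pvChunks (PySem.Str.splitlines txt) := by
  unfold splitIncludeFile_py_alt pvChunks
  cases hl : PySem.Str.splitlines txt with
  | nil => simp
  | cons l ls =>
  have hne : (l :: ls : List String) ≠ [] := by simp
  simp only []
  rw [if_neg hne, if_neg hne]
  rw [show (fun l => PySem.Str.startswith l "///") = pvKey from rfl]
  set L := l :: ls with hL
  set keys := L.map pvKey with hkeys
  have hklen : keys.length = L.length := by simp [hkeys]
  have hLlen : 1 ≤ L.length := by simp [hL]
  have hrange : PySem.List.pyRange 1 (PySem.List.len L) 1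
      = (List.range (L.length - 1)).map (fun k : Nat => (1 : Int) + ↑k) := by
    rw [PySem.List.len_eq, PySem.List.pyRange_one]
    have h1 : (((L.length : Int)) - 1).toNat = L.length - 1 := by omega
    rw [h1]
  have hpred : ∀ k : Nat,
      (PySem.List.pyGetD keys ((1:Int)+↑k) false != PySem.List.pyGetD keys (((1:Int)+↑k) - 1) false)
        = (keys.getD (1+k) false != keys.getD k false) := by
    intro k
    have h1 : ((1:Int)+↑k) = ((1+k : Nat) : Int) := by push_cast; ring
    have h2 : ((1+k : Nat) : Int) - 1 = ((k : Nat) : Int) := by push_cast; ring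
    rw [h1, h2, PySem.List.pyGetD_natCast, PySem.List.pyGetD_natCast]
  set F := (List.range (L.length - 1)).filter (fun k => keys.getD (1+k) false != keys.getD k false) with hF
  have hfiltInt : (PySem.List.pyRange 1 (PySem.List.len L) 1).filter
      (fun i => PySem.List.pyGetD keys i false != PySem.List.pyGetD keys (i - 1) false)
      = F.map (fun k : Nat => (1:Int)+↑k) := by
    rw [hrange, List.filter_map, hF]
    congr 1
    apply List.filter_congr
    intro k _
    simpa [Function.comp] using hpred k
  have hbnds : pvBnds keys = F.map (fun k => 1+k) := by
    unfold pvBnds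
    rw [hklen]
    rw [List.range'_eq_map_range, List.filter_map, hF]
    congr 1
    apply List.filter_congr
    intro k _
    have hk : 1 + k - 1 = k := by omega
    simp [Function.comp, hk]
  have hbounds : ([(0:Int)] ++ (PySem.List.pyRange 1 (PySem.List.len L) 1).filter
        (fun i => PySem.List.pyGetD keys i false != PySem.List.pyGetD keys (i - 1) false) ++ [PySem.List.len L])
      = (0 :: pvBnds keys ++ [L.length]).map (fun i : Nat => (i : Int)) := by
    rw [hfiltInt, hbnds, PySem.List.len_eq]
    simp [List.map_map, Function.comp]
  rw [hbounds]
  rw [← List.map_tail, List.zip_map, List.map_map]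
  apply List.map_congr_left
  rintro ⟨a, b⟩ _
  simp [pvChunk, Function.comp, Prod.map, PySem.List.slice_natCast, PySem.List.pyGetD_natCast]

lemma pvBnds_all_eq (keys : List Bool) (k : Bool) (hall : ∀ x ∈ keys, x = k) :
    pvBnds keys = [] := by
  unfold pvBnds
  rw [List.filter_eq_nil_iff]
  intro i hi
  rw [List.mem_range'_1] at hi
  have h1 : i < keys.length := by omega
  have h2 : i - 1 < keys.length := by omega
  rw [List.getD_eq_getElem keys false h1, List.getD_eq_getElem keys false h2,
      hall _ (keys.getElem_mem h1), hall _ (keys.getElem_mem h2)]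
  simp


lemma pvBnds_append (K R : List Bool) (k : Bool) (hK : ∀ x ∈ K, x = k) (hKne : K ≠ [])
    (hR0 : ∀ b bs, R = b :: bs → b = !k) (hRne : R ≠ []) :
    pvBnds (K ++ R) = K.length :: (pvBnds R).map (K.length + ·) := by
  obtain ⟨b, bs, rfl⟩ := List.exists_cons_of_ne_nil hRne
  have hb : b = !k := hR0 b bs rfl
  set m := K.length with hm
  have hm1 : 1 ≤ m := by
    cases K
    · exact absurd rfl hKne
    · simp [hm]
  set r := (b :: bs).length with hr
  have hr1 : 1 ≤ r := by simp [hr]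
  unfold pvBnds
  rw [List.length_append, ← hm, ← hr]
  have hlen : m + r - 1 = (m - 1) + r := by omega
  rw [hlen, ← List.range'_append_1]
  have hstart : 1 + (m - 1) = m := by omega
  rw [hstart]
  have hrsplit : r = (r - 1) + 1 := by omega
  rw [show List.range' m r = m :: List.range' (m + 1) (r - 1) by
        rw [hrsplit]; exact List.range'_succ]
  rw [List.filter_append, List.filter_cons]
  have hpart1 : (List.range' 1 (m - 1)).filter
      (fun i => (K ++ b :: bs).getD i false != (K ++ b :: bs).getD (i - 1) false) = [] := by
    rw [List.filter_eq_nil_iff]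
    intro i hi
    rw [List.mem_range'_1] at hi
    have h1 : i < K.length := by omega
    have h2 : i - 1 < K.length := by omega
    rw [List.getD_append _ _ _ _ h1, List.getD_append _ _ _ _ h2,
        List.getD_eq_getElem K false h1, List.getD_eq_getElem K false h2,
        hK _ (K.getElem_mem h1), hK _ (K.getElem_mem h2)]
    simp
  have hpredm : ((K ++ b :: bs).getD m false != (K ++ b :: bs).getD (m - 1) false) = true := by
    have e1 : (K ++ b :: bs).getD m false = b := by
      rw [List.getD_append_right K _ false m (by omega)]
      simp [hm]
    have e2 : (K ++ b :: bs).getD (m - 1) false = k := by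
      have h2 : m - 1 < K.length := by omega
      rw [List.getD_append _ _ _ _ h2, List.getD_eq_getElem K false h2]
      exact hK _ (K.getElem_mem h2)
    rw [e1, e2, hb]
    cases k <;> simp
  have hpart3 : (List.range' (m + 1) (r - 1)).filter
      (fun i => (K ++ b :: bs).getD i false != (K ++ b :: bs).getD (i - 1) false)
      = (pvBnds (b :: bs)).map (m + ·) := by
    unfold pvBnds
    rw [show (b :: bs).length - 1 = r - 1 by omega]
    rw [List.range'_eq_map_range, List.range'_eq_map_range, List.filter_map, List.filter_map,
        List.map_map]
    have hfun : ((fun x => m + x) ∘ (fun x => 1 + x)) = (fun j : Nat => (m + 1) + j) := by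
      funext j
      simp only [Function.comp]
      omega
    rw [hfun]
    congr 1
    apply List.filter_congr
    intro j _
    simp only [Function.comp]
    have e1 : (K ++ b :: bs).getD (m + 1 + j) false = (b :: bs).getD (1 + j) false := by
      rw [List.getD_append_right K _ false _ (by omega)]
      congr 1
      omega
    have e2 : (K ++ b :: bs).getD (m + 1 + j - 1) false = (b :: bs).getD j false := by
      rw [List.getD_append_right K _ false _ (by omega)]
      congr 1
      omega
    have e3 : (b :: bs).getD (1 + j - 1) false = (b :: bs).getD j false := by
      congr 1
      omega
    rw [e1, e2, e3]
  rw [hpart1, hpart3, if_pos hpredm]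
  rw [List.nil_append]
  have hback : List.filter (fun i => (b :: bs).getD i false != (b :: bs).getD (i - 1) false)
      (List.range' 1 (r - 1)) = pvBnds (b :: bs) := by
    unfold pvBnds
    rw [← hr]
  rw [hback]

lemma pvChunks_runs_aux (n : Nat) : ∀ (lines : List String), lines.length ≤ n →
    pvChunks lines = (pvRuns lines).map pvOut := by
  induction n with
  | zero =>
    intro lines hn
    have : lines = [] := List.eq_nil_of_length_eq_zero (Nat.le_zero.mp hn)
    subst this
    simp [pvChunks, pvRuns]
  | succ n ih =>
    intro lines hn
    cases lines with
    | nil => simp [pvChunks, pvRuns]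
    | cons l ls =>
      set k := pvKey l with hk
      set g := ls.takeWhile (fun x => PySem.Str.startswith x "///" == k) with hg
      set rest := ls.dropWhile (fun x => PySem.Str.startswith x "///" == k) with hrest
      have hsplit : ls = g ++ rest := (List.takeWhile_append_dropWhile).symm
      have hgkeys : ∀ x ∈ g, pvKey x = k := by
        intro x hx
        have := List.mem_takeWhile_imp (hg ▸ hx)
        simpa [pvKey] using this
      have hruns : pvRuns (l :: ls) = (k, l :: g) :: pvRuns rest := by
        rw [pvRuns]
        simp only [hk, hg, hrest, pvKey]
      set A := l :: g with hA
      have hlines : l :: ls = A ++ rest := by rw [hA, hsplit]; rfl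
      set K := A.map pvKey with hKdef
      set R := rest.map pvKey with hRdef
      have hKA : K.length = A.length := by simp [hKdef]
      have hKall : ∀ x ∈ K, x = k := by
        intro x hx
        rw [hKdef] at hx
        obtain ⟨y, hy, rfl⟩ := List.mem_map.mp hx
        rw [hA] at hy
        rcases List.mem_cons.mp hy with h | h
        · rw [h]
        · exact hgkeys y h
      have hkeys : (l :: ls).map pvKey = K ++ R := by
        rw [hlines, List.map_append]
      have hcu : pvChunks (l :: ls)
          = (((0 :: pvBnds (K ++ R) ++ [(l :: ls).length]).zip
              (0 :: pvBnds (K ++ R) ++ [(l :: ls).length]).tail).map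
              (pvChunk (l :: ls) (K ++ R))) := by
        unfold pvChunks
        rw [if_neg (by simp), hkeys]
      rw [hcu, hruns]
      cases hrc : rest with
      | nil =>
        have hlsg : l :: ls = A := by rw [hlines, hrc, List.append_nil]
        have hRnil : R = [] := by rw [hRdef, hrc]; rfl
        rw [hRnil, List.append_nil, pvBnds_all_eq K k hKall]
        have hchunk : pvChunk (l :: ls) K (0, (l :: ls).length) = pvOut (k, l :: g) := by
          unfold pvChunk pvOut
          have htake : ((l :: ls).drop 0).take ((l :: ls).length - 0) = l :: g := by
            simp [← hA, ← hlsg]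
          have hget : K.getD 0 false = k := by
            rw [List.getD_eq_getElem K false (by rw [hKA, hA]; simp),
                hKall _ (K.getElem_mem _)]
          rw [htake, hget]
        have hzip1 : ((0 :: ([] : List Nat) ++ [(l :: ls).length]).zip
            (0 :: ([] : List Nat) ++ [(l :: ls).length]).tail)
            = [(0, (l :: ls).length)] := rfl
        rw [hzip1, List.map_cons, List.map_nil, hchunk]
        have hre : pvRuns ([] : List String) = [] := by rw [pvRuns]
        rw [hre]
        rfl
      | cons r0 rs =>
        have hRcons : R = pvKey r0 :: rs.map pvKey := by rw [hRdef, hrc]; rfl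
        have hr0 : pvKey r0 = !k := by
          have h2 := List.head?_dropWhile_not (fun x => PySem.Str.startswith x "///" == k) ls
          rw [← hrest, hrc] at h2
          simp only [List.head?_cons] at h2
          have h3 : PySem.Str.startswith r0 "///" ≠ k := by simpa using h2
          exact Bool.eq_not_of_ne h3
        have hR0 : ∀ b bs, R = b :: bs → b = !k := by
          intro b bs hb
          rw [hRcons] at hb
          rw [← ((List.cons.injEq _ _ _ _).mp hb).1, hr0]
        have hRne : R ≠ [] := by rw [hRcons]; simp
        rw [pvBnds_append K R k hKall (by rw [hKdef, hA]; simp) hR0 hRne]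
        have hlen : (l :: ls).length = K.length + rest.length := by
          rw [hlines, hKA]
          simp
        set bR := 0 :: pvBnds R ++ [rest.length] with hbR
        have hmapbR : (K.length :: (pvBnds R).map (K.length + ·)) ++ [(l :: ls).length]
            = bR.map (K.length + ·) := by
          rw [hbR, hlen]
          simp
        have hshape : (0 :: (K.length :: (pvBnds R).map (K.length + ·)) ++ [(l :: ls).length])
            = 0 :: bR.map (K.length + ·) := by
          rw [← hmapbR]
          rfl
        rw [hshape]
        have hbRcons : bR.map (K.length + ·)
            = (K.length + 0) :: (pvBnds R ++ [rest.length]).map (K.length + ·) := by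
          rw [hbR]
          rfl
        have htl : pvBnds R ++ [rest.length] = bR.tail := rfl
        have hbRcons' : bR.map (K.length + ·)
            = (K.length + 0) :: (bR.tail).map (K.length + ·) := by
          rw [hbRcons, htl]
        have hzip : (0 :: bR.map (K.length + ·)).zip (0 :: bR.map (K.length + ·)).tail
            = (0, K.length + 0) :: (bR.zip bR.tail).map (Prod.map (K.length + ·) (K.length + ·)) := by
          rw [List.tail_cons, hbRcons', List.zip_cons_cons]
          congr 1
          rw [← hbRcons', List.zip_map]
        rw [hzip, List.map_cons]
        have hhead : pvChunk (l :: ls) (K ++ R) (0, K.length + 0) = pvOut (k, l :: g) := by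
          unfold pvChunk pvOut
          have htake : ((l :: ls).drop 0).take (K.length + 0 - 0) = l :: g := by
            rw [List.drop_zero, hlines]
            have he : K.length + 0 - 0 = A.length := by omega
            rw [he, List.take_left, hA]
          have hget : (K ++ R).getD 0 false = k := by
            rw [List.getD_append _ _ _ _ (by rw [hKA, hA]; simp),
                List.getD_eq_getElem K false (by rw [hKA, hA]; simp),
                hKall _ (K.getElem_mem _)]
          rw [htake, hget]
        rw [hhead]
        have htail : ((bR.zip bR.tail).map (Prod.map (K.length + ·) (K.length + ·))).map
              (pvChunk (l :: ls) (K ++ R))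
            = (bR.zip bR.tail).map (pvChunk rest R) := by
          rw [List.map_map]
          apply List.map_congr_left
          rintro ⟨a, b⟩ _
          simp only [Function.comp, Prod.map]
          unfold pvChunk
          have hdrop : (l :: ls).drop (K.length + a) = rest.drop a := by
            rw [hlines, hKA]
            exact List.drop_length_add_append a
          have htk : K.length + b - (K.length + a) = b - a := by omega
          have hget : (K ++ R).getD (K.length + a) false = R.getD a false := by
            rw [List.getD_append_right K R false _ (by omega)]
            congr 1
            omega
          rw [hdrop, htk, hget]
        rw [htail]
        have hrestchunks : pvChunks rest = (bR.zip bR.tail).map (pvChunk rest R) := by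
          unfold pvChunks
          rw [if_neg (by rw [hrc]; simp)]
        have hrlen : rest.length ≤ n := by
          have h1 : rest.length ≤ ls.length := by
            rw [hrest]
            exact List.length_dropWhile_le _ _
          simp only [List.length_cons] at hn
          omega
        rw [← hrestchunks, ih rest hrlen, List.map_cons, hrc]

-- ===== VERDICT (by name: the statement is the Claim_ definition above) =====
theorem splitIncludeFile_py_spec : Claim_equal_splitIncludeFile_py := by
  intro txt _
  unfold Spec_splitIncludeFile_py
  rw [pvA_runs, pvAlt_chunks, pvChunks_runs_aux (PySem.Str.splitlines txt).length _ le_rfl]
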